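-- pv_equiv track=rewrite | github.com/diyaravishankar/DSA-Practice | Karan/Tree/segment trees/Minimum Stability Factor of Array.py | minStable
-- ===== SOURCE A (Python) =====
-- from math import gcd
--
-- def minStable(nums: list[int], maxC: int) -> int:
--     n = len(nums)
--     st = [[0]*n for _ in range((n+1).bit_length())]
--     for i in range(n):
--         st[0][i] = nums[i]
--     idx = 1
--     while (1 << idx) <= n:
--         length = 1 << (idx-1)
--         for i in range(n - (1<<idx) + 1):
--             st[idx][i] = gcd(st[idx-1][i], st[idx-1][i+length])
--         idx += 1
--     sp = [0]*(n+2)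
--     for i in range(2, n+2):
--         sp[i] = sp[i//2] + 1
--     def rangeGCD(l, r):
--         idx = sp[r-l+1]
--         return gcd(st[idx][l], st[idx][r-(1<<idx)+1])
--     def can(k):
--         length = k+1
--         if length > n:
--             return True
--         used = 0
--         last = -1
--         for i in range(n - length + 1):
--             if rangeGCD(i, i+length-1) > 1:
--                 if i > last:
--                     used += 1
--                     if used > maxC:
--                         return False
--                     last = i+length-1
--         return True
--     mini = n
--     left, right = 0, n
--     while left <= right:
--         mid = (left + right) // 2
--         if can(mid):
--             mini = mid
--             right = mid - 1
--         else:
--             left = mid + 1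
--     return mini
-- ===== SOURCE B (Python) =====
-- from math import gcd
--
-- def minStable(nums: list[int], maxC: int) -> int:
--     n = len(nums)
--
--     def can(k):
--         length = k + 1
--         if length > n:
--             return True
--         used = 0
--         i = 0
--         while i <= n - length:
--             g = 0
--             for j in range(i, i + length):
--                 g = gcd(g, nums[j])
--                 if g == 1:
--                     break  # gcd can only stay 1 from here on
--             if g > 1:
--                 used += 1
--                 if used > maxC:
--                     return False
--                 i += length  # every window starting before i+length is already covered
--             else:
--                 i += 1
--         return True
--
--     mini = n
--     left, right = 0, n
--     while left <= right:
--         mid = (left + right) // 2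
--         if can(mid):
--             mini = mid
--             right = mid - 1
--         else:
--             left = mid + 1
--     return mini
-- ===== Notes on version B (the rewrite author's own statement) =====
-- stated objective: simpler
-- what changed: B drops the sparse-table/log-table range-GCD machinery entirely, computing each window's gcd by a direct fold over the slice that short-circuits once the gcd reaches 1, and the greedy cover check jumps straight past a chosen window (i += length) instead of scanning every start position; the outer binary search is kept since can() is only assumed monotone.
import Mathlib
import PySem

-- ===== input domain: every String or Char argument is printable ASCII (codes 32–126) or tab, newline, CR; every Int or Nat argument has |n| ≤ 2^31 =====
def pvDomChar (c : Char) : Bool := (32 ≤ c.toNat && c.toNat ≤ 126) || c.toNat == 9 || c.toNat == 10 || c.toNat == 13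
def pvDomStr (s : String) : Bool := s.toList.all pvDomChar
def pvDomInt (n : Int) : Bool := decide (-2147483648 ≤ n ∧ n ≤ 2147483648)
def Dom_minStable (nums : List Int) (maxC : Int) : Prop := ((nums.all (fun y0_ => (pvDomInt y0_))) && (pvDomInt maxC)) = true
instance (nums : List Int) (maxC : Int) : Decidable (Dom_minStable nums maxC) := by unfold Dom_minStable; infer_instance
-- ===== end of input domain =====

-- B replaces A's sparse-table range-GCD machinery by a direct per-window gcd fold and lets the
-- greedy check jump past each chosen window instead of scanning every start; objective: simpler.

-- ===== PORT A =====
-- math.gcd a b: the nonnegative gcd of |a| and |b| (exact)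
def pgcd (a b : Int) : Int := (Int.gcd a b : Int)

-- the 'while (1 << idx) <= n' sparse-table build; each written row is produced as the map the
-- inner for-loop writes (the preallocated zero tail of a row, and the never-written zero rows,
-- are reproduced by the getD-0 defaults used at read time)
def stBuild (n : Nat) : Nat → Nat → List Int → List (List Int)
  | 0, _, _ => []          -- fuel only: n + 1 unfoldings always cover every idx with 2^idx ≤ n
  | fuel + 1, idx, prev =>
    if 2 ^ idx ≤ n then
      (List.range (n - 2 ^ idx + 1)).map
          (fun i => pgcd (prev.getD i 0) (prev.getD (i + 2 ^ (idx - 1)) 0)) ::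
        stBuild n fuel (idx + 1) ((List.range (n - 2 ^ idx + 1)).map
          (fun i => pgcd (prev.getD i 0) (prev.getD (i + 2 ^ (idx - 1)) 0)))
    else []

-- 'for i in range(2, n+2): sp[i] = sp[i//2] + 1'
def spBuild (n : Nat) : List Nat :=
  (List.range' 2 n).foldl (fun sp i => sp ++ [sp.getD (i / 2) 0 + 1]) [0, 0]

-- Python's second index r - (1 << idx) + 1 is computed as r + 1 - 2^j, the same integer on
-- every query the program makes (where 2^j ≤ r - l + 1), avoiding spurious ℕ clamping
def rangeGCD_A (st : List (List Int)) (sp : List Nat) (l r : Nat) : Int :=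
  let j := sp.getD (r - l + 1) 0
  pgcd ((st.getD j []).getD l 0) ((st.getD j []).getD (r + 1 - 2 ^ j) 0)

-- the 'for i in range(n - length + 1)' loop of can(k), with its early False return
def canLoopA (maxC : Int) (st : List (List Int)) (sp : List Nat) (n L : Nat) :
    Nat → Nat → Int → Int → Bool
  | 0, _, _, _ => true     -- fuel only: n + 1 unfoldings always reach the loop's exit test
  | fuel + 1, i, used, last =>
    if i < n - L + 1 then
      if rangeGCD_A st sp i (i + L - 1) > 1 then
        if (i : Int) > last then
          if used + 1 > maxC then false
          else canLoopA maxC st sp n L fuel (i + 1) (used + 1) ((i : Int) + (L : Int) - 1)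
        else canLoopA maxC st sp n L fuel (i + 1) used last
      else canLoopA maxC st sp n L fuel (i + 1) used last
    else true

def canA (maxC : Int) (st : List (List Int)) (sp : List Nat) (n : Nat) (k : Int) : Bool :=
  if k + 1 > (n : Int) then true
  else canLoopA maxC st sp n (k + 1).toNat (n + 1) 0 0 (-1)

-- the 'while left <= right' binary search
def bsA (maxC : Int) (st : List (List Int)) (sp : List Nat) (n : Nat) :
    Nat → Int → Int → Int → Int
  | 0, _, _, mini => mini  -- fuel only: n + 2 unfoldings always cover the halving search
  | fuel + 1, left, right, mini =>
    if left ≤ right then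
      if canA maxC st sp n (PySem.Int.floordiv (left + right) 2) then
        bsA maxC st sp n fuel left (PySem.Int.floordiv (left + right) 2 - 1)
          (PySem.Int.floordiv (left + right) 2)
      else bsA maxC st sp n fuel (PySem.Int.floordiv (left + right) 2 + 1) right mini
    else mini

def minStable (nums : List Int) (maxC : Int) : Int :=
  bsA maxC (nums :: stBuild nums.length (nums.length + 1) 1 nums) (spBuild nums.length)
    nums.length (nums.length + 2) 0 (nums.length : Int) (nums.length : Int)

-- ===== PORT B =====
-- 'g = 0; for j in range(i, i+length): g = gcd(g, nums[j]); if g == 1: break'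
-- (length is Lm1 + 1; the loop is only ever entered with i + length ≤ len(nums), so the
-- getD-0 default is never taken where Python would raise)
def winGcdGo (nums : List Int) : Nat → Nat → Int → Int
  | _, 0, g => g
  | j, cnt + 1, g =>
    if pgcd g (nums.getD j 0) = 1 then pgcd g (nums.getD j 0)
    else winGcdGo nums (j + 1) cnt (pgcd g (nums.getD j 0))

def winGcd (nums : List Int) (i Lm1 : Nat) : Int :=
  winGcdGo nums i (Lm1 + 1) 0

-- the 'while i <= n - length' loop of B's can(k): after choosing the window at i, jump to i+length
def canLoopB (nums : List Int) (maxC : Int) (Lm1 : Nat) : Nat → Nat → Int → Bool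
  | 0, _, _ => true        -- fuel only: n + 1 unfoldings always reach the loop's exit test
  | fuel + 1, i, used =>
    if i < nums.length - (Lm1 + 1) + 1 then
      if winGcd nums i Lm1 > 1 then
        if used + 1 > maxC then false
        else canLoopB nums maxC Lm1 fuel (i + (Lm1 + 1)) (used + 1)
      else canLoopB nums maxC Lm1 fuel (i + 1) used
    else true

def canB (nums : List Int) (maxC : Int) (k : Int) : Bool :=
  if k + 1 > (nums.length : Int) then true
  else canLoopB nums maxC k.toNat (nums.length + 1) 0 0

def bsB (nums : List Int) (maxC : Int) : Nat → Int → Int → Int → Int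
  | 0, _, _, mini => mini  -- fuel only: n + 2 unfoldings always cover the halving search
  | fuel + 1, left, right, mini =>
    if left ≤ right then
      if canB nums maxC (PySem.Int.floordiv (left + right) 2) then
        bsB nums maxC fuel left (PySem.Int.floordiv (left + right) 2 - 1)
          (PySem.Int.floordiv (left + right) 2)
      else bsB nums maxC fuel (PySem.Int.floordiv (left + right) 2 + 1) right mini
    else mini

def minStable_alt (nums : List Int) (maxC : Int) : Int :=
  bsB nums maxC (nums.length + 2) 0 (nums.length : Int) (nums.length : Int)

-- ===== PRECONDITION & SPEC =====
def Spec_minStable (nums : List Int) (maxC : Int) (out : Int) : Prop := out = minStable_alt nums maxC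
instance (nums : List Int) (maxC : Int) (out : Int) : Decidable (Spec_minStable nums maxC out) := by unfold Spec_minStable; infer_instance

-- ===== CLAIM (what is proved, stated in full; the proofs are below) =====
def Claim_equal_minStable : Prop := ∀ (nums : List Int) (maxC : Int), Dom_minStable nums maxC → Spec_minStable nums maxC (minStable nums maxC)

-- ===== LEMMAS AND PROOFS =====

-- basic facts about pgcd
theorem pgcd_nonneg (a b : Int) : 0 ≤ pgcd a b := Int.natCast_nonneg _

theorem dvd_pgcd_iff (d a b : Int) : d ∣ pgcd a b ↔ d ∣ a ∧ d ∣ b := by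
  constructor
  · intro h
    exact ⟨h.trans (Int.gcd_dvd_left a b), h.trans (Int.gcd_dvd_right a b)⟩
  · rintro ⟨ha, hb⟩
    have h1 : d.natAbs ∣ Int.gcd a b :=
      Int.dvd_gcd (Int.natAbs_dvd.mpr ha) (Int.natAbs_dvd.mpr hb)
    exact Int.natAbs_dvd.mp (Int.natCast_dvd_natCast.mpr h1)

-- gcd-of-a-window spec value
def G (nums : List Int) (i L : Nat) : Int := ((nums.drop i).take L).foldl pgcd 0

theorem foldl_pgcd_nonneg (l : List Int) (g : Int) (hg : 0 ≤ g) : 0 ≤ l.foldl pgcd g := by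
  induction l generalizing g with
  | nil => simpa using hg
  | cons x xs ih => exact ih _ (pgcd_nonneg g x)

theorem dvd_foldl_pgcd (l : List Int) (g d : Int) :
    d ∣ l.foldl pgcd g ↔ d ∣ g ∧ ∀ x ∈ l, d ∣ x := by
  induction l generalizing g with
  | nil => simp
  | cons x rest ih =>
    simp only [List.foldl_cons, ih, dvd_pgcd_iff, List.mem_cons]
    constructor
    · rintro ⟨⟨h1, h2⟩, h3⟩
      exact ⟨h1, by rintro y (rfl | hy); exact h2; exact h3 y hy⟩
    · rintro ⟨h1, h2⟩
      exact ⟨⟨h1, h2 x (Or.inl rfl)⟩, fun y hy => h2 y (Or.inr hy)⟩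

theorem dvd_G_iff (nums : List Int) (i L : Nat) (hiL : i + L ≤ nums.length) (d : Int) :
    d ∣ G nums i L ↔ ∀ t < L, d ∣ nums.getD (i + t) 0 := by
  have hlen : ((nums.drop i).take L).length = L := by
    simp only [List.length_take, List.length_drop]; omega
  rw [G, dvd_foldl_pgcd]
  simp only [dvd_zero, true_and]
  constructor
  · intro h t ht
    have ht' : t < ((nums.drop i).take L).length := by omega
    have hmem : ((nums.drop i).take L)[t] ∈ (nums.drop i).take L := List.getElem_mem ht'
    have hval : ((nums.drop i).take L)[t] = nums.getD (i + t) 0 := by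
      rw [List.getElem_take, List.getElem_drop,
        List.getD_eq_getElem nums 0 (by omega)]
    rw [← hval]
    exact h _ hmem
  · intro h x hx
    obtain ⟨t, ht, rfl⟩ := List.mem_iff_getElem.mp hx
    have hval : ((nums.drop i).take L)[t] = nums.getD (i + t) 0 := by
      rw [List.getElem_take, List.getElem_drop,
        List.getD_eq_getElem nums 0 (by simp at ht ⊢; omega)]
    rw [hval]
    exact h t (by omega)

theorem G_nonneg (nums : List Int) (i L : Nat) : 0 ≤ G nums i L :=
  foldl_pgcd_nonneg _ _ le_rfl

-- the value a sparse-table cell of level j at position i holds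
def Bv (nums : List Int) : Nat → Nat → Int
  | 0, i => nums.getD i 0
  | j + 1, i => pgcd (Bv nums j i) (Bv nums j (i + 2 ^ j))

theorem dvd_Bv_iff (nums : List Int) (j i : Nat) (d : Int) :
    d ∣ Bv nums j i ↔ ∀ t < 2 ^ j, d ∣ nums.getD (i + t) 0 := by
  induction j generalizing i with
  | zero =>
    simp only [Bv, pow_zero]
    constructor
    · intro h t ht
      interval_cases t
      simpa using h
    · intro h
      simpa using h 0 (by omega)
  | succ j ih =>
    rw [Bv, dvd_pgcd_iff, ih, ih]
    constructor
    · rintro ⟨h1, h2⟩ t ht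
      by_cases hc : t < 2 ^ j
      · exact h1 t hc
      · have h2' := h2 (t - 2 ^ j) (by rw [pow_succ] at ht; omega)
        rwa [show i + 2 ^ j + (t - 2 ^ j) = i + t by omega] at h2'
    · intro h
      refine ⟨fun t ht => h t (by rw [pow_succ]; omega), fun t ht => ?_⟩
      have := h (2 ^ j + t) (by rw [pow_succ]; omega)
      rwa [show i + (2 ^ j + t) = i + 2 ^ j + t by omega] at this

theorem row_getD (nums prev : List Int) (idx : Nat) (h1 : 1 ≤ idx)
    (hn : 2 ^ idx ≤ nums.length)
    (hp : ∀ i < nums.length - 2 ^ (idx - 1) + 1, prev.getD i 0 = Bv nums (idx - 1) i) :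
    ∀ i < nums.length - 2 ^ idx + 1,
      ((List.range (nums.length - 2 ^ idx + 1)).map
        (fun i => pgcd (prev.getD i 0) (prev.getD (i + 2 ^ (idx - 1)) 0))).getD i 0
        = Bv nums idx i := by
  intro i hi
  obtain ⟨j, rfl⟩ : ∃ j, idx = j + 1 := ⟨idx - 1, by omega⟩
  have hpow : 2 ^ (j + 1) = 2 ^ j * 2 := pow_succ 2 j
  have hj1 : (1 : Nat) ≤ 2 ^ j := Nat.one_le_two_pow
  simp only [Nat.add_sub_cancel] at hp ⊢
  rw [List.getD_eq_getElem _ _ (by simpa using hi), List.getElem_map, List.getElem_range]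
  rw [hp i (by omega), hp (i + 2 ^ j) (by omega)]
  simp only [Bv]

theorem stBuild_getD (nums : List Int) :
    ∀ (kk fuel idx : Nat) (prev : List Int), kk < fuel → 1 ≤ idx →
    (∀ i < nums.length - 2 ^ (idx - 1) + 1, prev.getD i 0 = Bv nums (idx - 1) i) →
    2 ^ (idx + kk) ≤ nums.length →
    ∀ i < nums.length - 2 ^ (idx + kk) + 1,
      ((stBuild nums.length fuel idx prev).getD kk []).getD i 0 = Bv nums (idx + kk) i := by
  intro kk
  induction kk with
  | zero =>
    intro fuel idx prev hf h1 hp h2 i hi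
    obtain ⟨f, rfl⟩ : ∃ f, fuel = f + 1 := ⟨fuel - 1, by omega⟩
    rw [stBuild, if_pos (by simpa using h2), List.getD_cons_zero]
    simpa using row_getD nums prev idx h1 (by simpa using h2) hp i (by simpa using hi)
  | succ kk ih =>
    intro fuel idx prev hf h1 hp h2 i hi
    obtain ⟨f, rfl⟩ : ∃ f, fuel = f + 1 := ⟨fuel - 1, by omega⟩
    have hle : 2 ^ idx ≤ nums.length :=
      le_trans (Nat.pow_le_pow_right (by norm_num) (by omega)) h2
    rw [stBuild, if_pos hle, List.getD_cons_succ]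
    have h2' : 2 ^ (idx + 1 + kk) ≤ nums.length := by
      rwa [show idx + 1 + kk = idx + (kk + 1) from by omega]
    have := ih f (idx + 1) ((List.range (nums.length - 2 ^ idx + 1)).map
        (fun i => pgcd (prev.getD i 0) (prev.getD (i + 2 ^ (idx - 1)) 0)))
      (by omega) (by omega)
      (by simpa using row_getD nums prev idx h1 hle hp)
      h2' i (by rwa [show idx + 1 + kk = idx + (kk + 1) from by omega])
    rwa [show idx + 1 + kk = idx + (kk + 1) from by omega] at this

theorem st_getD (nums : List Int) (j : Nat) (hj : 2 ^ j ≤ nums.length)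
    (i : Nat) (hi : i < nums.length - 2 ^ j + 1) :
    (((nums :: stBuild nums.length (nums.length + 1) 1 nums).getD j []).getD i 0)
      = Bv nums j i := by
  cases j with
  | zero =>
    rw [List.getD_cons_zero]
    simp [Bv]
  | succ j' =>
    rw [List.getD_cons_succ]
    have hjn : j' < nums.length := by
      have h1 : j' + 1 < 2 ^ (j' + 1) := Nat.lt_two_pow_self
      omega
    have := stBuild_getD nums j' (nums.length + 1) 1 nums (by omega) (by omega)
      (by intro i _; simp [Bv]) (by simpa [Nat.add_comm] using hj) i
      (by simpa [Nat.add_comm] using hi)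
    simpa [Nat.add_comm] using this

-- sp[m] is the floor log2 of m
def spv : Nat → Nat
  | m => if 2 ≤ m then spv (m / 2) + 1 else 0
  decreasing_by omega

theorem spv_low : ∀ m, 1 ≤ m → 2 ^ spv m ≤ m := by
  intro m
  induction m using Nat.strong_induction_on with
  | _ m ih =>
    intro hm
    rw [spv]
    split
    · next h2 =>
      have := ih (m / 2) (by omega) (by omega)
      rw [pow_succ]
      omega
    · simpa using hm

theorem spv_high : ∀ m, m < 2 ^ (spv m + 1) := by
  intro m
  induction m using Nat.strong_induction_on with
  | _ m ih =>
    rw [spv]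
    split
    · next h2 =>
      have := ih (m / 2) (by omega)
      rw [pow_succ, pow_succ] at *
      omega
    · next h2 => simpa using by omega

theorem spv_zero : spv 0 = 0 := by rw [spv]; simp

theorem spv_one : spv 1 = 0 := by rw [spv]; simp

theorem spv_step (m : Nat) (h : 2 ≤ m) : spv m = spv (m / 2) + 1 := by
  rw [spv]; simp [h]

theorem spBuild_inv (t : Nat) :
    (List.range' 2 t).foldl (fun sp i => sp ++ [sp.getD (i / 2) 0 + 1]) [0, 0]
      = (List.range (t + 2)).map spv := by
  induction t with
  | zero =>
    simp [List.range_succ, spv_zero, spv_one]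
  | succ t ih =>
    rw [List.range'_concat, List.foldl_append, ih]
    simp only [List.foldl_cons, List.foldl_nil]
    have hidx : (2 + 1 * t) / 2 < t + 2 := by omega
    have hget : ((List.range (t + 2)).map spv).getD ((2 + 1 * t) / 2) 0 = spv ((2 + 1 * t) / 2) := by
      rw [List.getD_eq_getElem _ _ (by simpa using hidx), List.getElem_map, List.getElem_range]
    rw [hget, show t + 1 + 2 = (t + 2) + 1 from by omega, List.range_succ, List.map_append]
    have : spv ((2 + 1 * t) / 2) + 1 = spv (t + 2) := by
      rw [spv_step (t + 2) (by omega), show (2 + 1 * t) / 2 = (t + 2) / 2 from by omega]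
    rw [this]
    simp [List.range_succ]

theorem spBuild_getD (n : Nat) : ∀ m < n + 2, (spBuild n).getD m 0 = spv m := by
  intro m hm
  rw [spBuild, spBuild_inv n,
    List.getD_eq_getElem _ _ (by simpa using hm), List.getElem_map, List.getElem_range]

-- the range-GCD query returns the gcd of the whole window
theorem rangeGCD_eq_G (nums : List Int) (l L : Nat) (hL : 1 ≤ L)
    (hln : l + L ≤ nums.length) :
    rangeGCD_A (nums :: stBuild nums.length (nums.length + 1) 1 nums) (spBuild nums.length)
      l (l + L - 1) = G nums l L := by
  have hmn : l + L - 1 - l + 1 = L := by omega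
  have hsp : (spBuild nums.length).getD L 0 = spv L := spBuild_getD _ L (by omega)
  have hjl : 2 ^ spv L ≤ L := spv_low L hL
  have hjh : L < 2 ^ (spv L + 1) := spv_high L
  have hpowj : 2 ^ (spv L + 1) = 2 ^ spv L * 2 := pow_succ 2 (spv L)
  have hj1 : (1 : Nat) ≤ 2 ^ spv L := Nat.one_le_two_pow
  simp only [rangeGCD_A, hmn, hsp]
  have h1 : l < nums.length - 2 ^ spv L + 1 := by omega
  have hidx2 : l + L - 1 + 1 - 2 ^ spv L = l + (L - 2 ^ spv L) := by omega
  have h2 : l + (L - 2 ^ spv L) < nums.length - 2 ^ spv L + 1 := by omega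
  rw [st_getD nums (spv L) (by omega) l h1, hidx2,
    st_getD nums (spv L) (by omega) _ h2]
  apply Int.dvd_antisymm (pgcd_nonneg _ _) (G_nonneg _ _ _)
  · rw [dvd_G_iff nums l L hln]
    intro t ht
    have hdvd := (dvd_pgcd_iff
        (pgcd (Bv nums (spv L) l) (Bv nums (spv L) (l + (L - 2 ^ spv L))))
        (Bv nums (spv L) l) (Bv nums (spv L) (l + (L - 2 ^ spv L)))).mp dvd_rfl
    rcases lt_or_ge t (2 ^ spv L) with hc | hc
    · exact (dvd_Bv_iff nums (spv L) l _).mp hdvd.1 t hc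
    · have := (dvd_Bv_iff nums (spv L) (l + (L - 2 ^ spv L)) _).mp
        hdvd.2 (t - (L - 2 ^ spv L)) (by omega)
      rwa [show l + (L - 2 ^ spv L) + (t - (L - 2 ^ spv L)) = l + t from by omega] at this
  · rw [dvd_pgcd_iff]
    constructor
    · rw [dvd_Bv_iff]
      intro t ht
      exact (dvd_G_iff nums l L hln _).mp dvd_rfl t (by omega)
    · rw [dvd_Bv_iff]
      intro t ht
      have := (dvd_G_iff nums l L hln _).mp dvd_rfl ((L - 2 ^ spv L) + t) (by omega)
      rwa [show l + ((L - 2 ^ spv L) + t) = l + (L - 2 ^ spv L) + t from by omega] at this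

theorem foldl_pgcd_one (l : List Int) : l.foldl pgcd 1 = 1 := by
  induction l with
  | nil => rfl
  | cons x xs ih => simpa [pgcd, Int.one_gcd] using ih

theorem winGcdGo_eq_foldl (nums : List Int) :
    ∀ (cnt j : Nat) (g : Int), j + cnt ≤ nums.length →
      winGcdGo nums j cnt g = ((nums.drop j).take cnt).foldl pgcd g := by
  intro cnt
  induction cnt with
  | zero => intro j g _; rw [winGcdGo]; simp
  | succ cnt ih =>
    intro j g hj
    have hjl : j < nums.length := by omega
    rw [winGcdGo, List.drop_eq_getElem_cons hjl, List.take_succ_cons, List.foldl_cons,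
      List.getD_eq_getElem nums 0 hjl]
    split
    · next h1 => rw [h1, foldl_pgcd_one]
    · exact ih (j + 1) _ (by omega)

theorem winGcd_eq_G (nums : List Int) (i Lm1 : Nat) (h : i + (Lm1 + 1) ≤ nums.length) :
    winGcd nums i Lm1 = G nums i (Lm1 + 1) := by
  rw [winGcd, G, winGcdGo_eq_foldl nums (Lm1 + 1) i 0 h]

theorem canLoopA_exit (maxC : Int) (st : List (List Int)) (sp : List Nat) (n L : Nat)
    (fuel i : Nat) (used last : Int) (hg : ¬ (i < n - L + 1)) :
    canLoopA maxC st sp n L fuel i used last = true := by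
  cases fuel with
  | zero => rw [canLoopA]
  | succ f => rw [canLoopA, if_neg hg]

theorem canLoopB_exit (nums : List Int) (maxC : Int) (Lm1 : Nat) (fuel i : Nat) (used : Int)
    (hg : ¬ (i < nums.length - (Lm1 + 1) + 1)) :
    canLoopB nums maxC Lm1 fuel i used = true := by
  cases fuel with
  | zero => rw [canLoopB]
  | succ f => rw [canLoopB, if_neg hg]

-- the loops' value does not depend on the fuel once it covers the remaining iterations
theorem canLoopA_fuel (maxC : Int) (st : List (List Int)) (sp : List Nat) (n L : Nat) :
    ∀ (f f' i : Nat) (used last : Int), n - L + 1 ≤ f + i → n - L + 1 ≤ f' + i →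
      canLoopA maxC st sp n L f i used last = canLoopA maxC st sp n L f' i used last := by
  intro f
  induction f with
  | zero =>
    intro f' i used last hf hf'
    rw [canLoopA, canLoopA_exit maxC st sp n L f' i used last (by omega)]
  | succ f ih =>
    intro f' i used last hf hf'
    by_cases hg : i < n - L + 1
    · obtain ⟨g, rfl⟩ : ∃ g, f' = g + 1 := ⟨f' - 1, by omega⟩
      rw [canLoopA, canLoopA, if_pos hg, if_pos hg]
      split
      · split
        · split
          · rfl
          · exact ih g (i + 1) _ _ (by omega) (by omega)
        · exact ih g (i + 1) _ _ (by omega) (by omega)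
      · exact ih g (i + 1) _ _ (by omega) (by omega)
    · rw [canLoopA_exit maxC st sp n L _ i used last hg,
        canLoopA_exit maxC st sp n L f' i used last hg]

-- A's scan may be fast-forwarded across positions that cannot be selected
theorem canLoopA_skip (maxC : Int) (st : List (List Int)) (sp : List Nat) (n L : Nat)
    (used last : Int) :
    ∀ (k fuel i : Nat), (i : Int) + k ≤ last + 1 →
      canLoopA maxC st sp n L (fuel + k) i used last
        = canLoopA maxC st sp n L fuel (i + k) used last := by
  intro k
  induction k with
  | zero => intro fuel i _; rw [Nat.add_zero, Nat.add_zero]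
  | succ k ih =>
    intro fuel i hk
    by_cases hg : i < n - L + 1
    · have hni : ¬ ((i : Int) > last) := by push_cast at hk ⊢; omega
      rw [show fuel + (k + 1) = (fuel + k) + 1 from rfl, canLoopA, if_pos hg, if_neg hni]
      have := ih fuel (i + 1) (by push_cast at hk ⊢; omega)
      rw [show i + 1 + k = i + (k + 1) from by omega] at this
      split <;> exact this
    · rw [canLoopA_exit maxC st sp n L _ i used last hg,
        canLoopA_exit maxC st sp n L fuel (i + (k + 1)) used last (by omega)]

theorem loop_eq (nums : List Int) (maxC : Int) (Lm1 : Nat)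
    (hL : Lm1 + 1 ≤ nums.length) :
    ∀ (fuel i : Nat) (used last : Int),
      nums.length - (Lm1 + 1) + 1 ≤ fuel + i → last < (i : Int) →
      canLoopA maxC (nums :: stBuild nums.length (nums.length + 1) 1 nums)
        (spBuild nums.length) nums.length (Lm1 + 1) fuel i used last
      = canLoopB nums maxC Lm1 fuel i used := by
  intro fuel
  induction fuel with
  | zero =>
    intro i used last hf _
    rw [canLoopA_exit _ _ _ _ _ _ _ _ _ (by omega), canLoopB_exit _ _ _ _ _ _ (by omega)]
  | succ fuel ih =>
    intro i used last hf hlast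
    by_cases hg : i < nums.length - (Lm1 + 1) + 1
    · rw [canLoopA, canLoopB, if_pos hg, if_pos hg]
      have hiL : i + (Lm1 + 1) ≤ nums.length := by omega
      have hrg : rangeGCD_A (nums :: stBuild nums.length (nums.length + 1) 1 nums)
          (spBuild nums.length) i (i + (Lm1 + 1) - 1) = winGcd nums i Lm1 := by
        rw [rangeGCD_eq_G nums i (Lm1 + 1) (by omega) hiL, winGcd_eq_G nums i Lm1 hiL]
      rw [hrg, if_pos (show (i : Int) > last from hlast)]
      split
      · split
        · rfl
        · next hc =>
          rw [canLoopA_fuel maxC (nums :: stBuild nums.length (nums.length + 1) 1 nums)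
              (spBuild nums.length) nums.length (Lm1 + 1) fuel (fuel + Lm1) (i + 1)
              (used + 1) ((i : Int) + ((Lm1 + 1 : Nat) : Int) - 1) (by omega) (by omega),
            canLoopA_skip maxC (nums :: stBuild nums.length (nums.length + 1) 1 nums)
              (spBuild nums.length) nums.length (Lm1 + 1) (used + 1)
              ((i : Int) + ((Lm1 + 1 : Nat) : Int) - 1) Lm1 fuel (i + 1) (by push_cast; omega),
            show i + 1 + Lm1 = i + (Lm1 + 1) from by omega]
          exact ih (i + (Lm1 + 1)) (used + 1) _ (by omega) (by push_cast; omega)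
      · exact ih (i + 1) used last (by omega) (by push_cast; omega)
    · rw [canLoopA_exit _ _ _ _ _ _ _ _ _ hg, canLoopB_exit _ _ _ _ _ _ hg]

theorem can_eq (nums : List Int) (maxC : Int) (k : Int) (hk : 0 ≤ k) :
    canA maxC (nums :: stBuild nums.length (nums.length + 1) 1 nums) (spBuild nums.length)
      nums.length k
      = canB nums maxC k := by
  rw [canA, canB]
  by_cases hg : k + 1 > (nums.length : Int)
  · rw [if_pos hg, if_pos hg]
  · rw [if_neg hg, if_neg hg, show (k + 1).toNat = k.toNat + 1 from by omega]
    exact loop_eq nums maxC k.toNat (by omega) (nums.length + 1) 0 0 (-1) (by omega)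
      (by norm_num)

theorem bs_eq (nums : List Int) (maxC : Int) :
    ∀ (fuel : Nat) (left right mini : Int), (right + 1 - left).toNat ≤ fuel → 0 ≤ left →
      bsA maxC (nums :: stBuild nums.length (nums.length + 1) 1 nums) (spBuild nums.length)
        nums.length fuel left right mini
      = bsB nums maxC fuel left right mini := by
  intro fuel
  induction fuel with
  | zero => intro l r m hf h0; rw [bsA, bsB]
  | succ fuel ih =>
    intro l r m hf h0
    rw [bsA, bsB]
    by_cases hlr : l ≤ r
    · rw [if_pos hlr, if_pos hlr]
      have hmid := PySem.Int.floordiv_two_mid_bounds hlr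
      rw [can_eq nums maxC _ (by omega)]
      split
      · exact ih l _ _ (by omega) h0
      · exact ih _ r m (by omega) (by omega)
    · rw [if_neg hlr, if_neg hlr]

-- ===== VERDICT (by name: the statement is the Claim_ definition above) =====
theorem minStable_spec : Claim_equal_minStable := by
  intro nums maxC _
  unfold Spec_minStable minStable minStable_alt
  exact bs_eq nums maxC (nums.length + 2) 0 _ _ (by omega) le_rfl
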